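-- pv_equiv track=rewrite | github.com/ponson/CodeWar | 3kyuTotallyGoodPermutations.py | check_bad_counts
-- ===== SOURCE A (Python) =====
-- import itertools
--
-- def nmulti(num):
--     sum = 1
--     for i in range(1, num+1):
--         sum *= i
--     return sum
--
-- def check_bad_counts(pbadlist, palllen):
--
--     if len(pbadlist) == 1:
--         return nmulti(palllen - len(pbadlist[0]) + 1)
--     else: #handle >= 2 items cases
--         alphabetset = set()
--         alloflens = 0
--         for i in range(len(pbadlist)):
--             for n in pbadlist[i]:
--                 alphabetset.add(n)
--             alloflens += len(pbadlist[i])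
--         if alloflens == len(alphabetset):
--             return nmulti(palllen - alloflens + len(pbadlist))
--         else:
--             combineStr = ""
--             strrr = ''.join(a for a in alphabetset)
--             permutations = itertools.permutations(strrr)
--             for perm in permutations:
--                 if all(sub in ''.join(perm) for sub in pbadlist):
--                     combineStr = ''.join(perm)
--                     break
--             if combineStr:
--                 return nmulti(palllen - len(combineStr) + 1)
--             else:
--                 return 0
-- ===== SOURCE B (Python) =====
-- def _fact(n):
--     r = 1
--     for i in range(2, n + 1):
--         r *= i
--     return r
--
-- def check_bad_counts(pbadlist, palllen):
--     if len(pbadlist) == 1: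
--         return _fact(palllen - len(pbadlist[0]) + 1)
--     chars = []
--     total = 0
--     for s in pbadlist:
--         total += len(s)
--         for c in s:
--             if c not in chars:
--                 chars.append(c)
--     if total == len(chars):
--         return _fact(palllen - total + len(pbadlist))
--     # successor/predecessor constraint graph; a common superstring over the
--     # distinct characters exists iff the constraints are functional, injective
--     # and acyclic -- checked by walking the chains from their start characters.
--     succ = {}
--     pred = {}
--     for s in pbadlist:
--         for a, b in zip(s, s[1:]):
--             if succ.get(a, b) != b or pred.get(b, a) != a:
--                 return 0
--             succ[a] = b
--             pred[b] = a
--     out = []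
--     for c in chars:
--         if c not in pred:
--             x = c
--             out.append(x)
--             while x in succ:
--                 x = succ[x]
--                 out.append(x)
--     if len(out) != len(chars):
--         return 0
--     return _fact(palllen - len(chars) + 1)
-- ===== Notes on version B (the rewrite author's own statement) =====
-- stated objective: faster
-- what changed: B replaces A's scan over all k! permutations of the alphabet by building successor/predecessor constraint dictionaries from the adjacent character pairs of the bad strings and walking the resulting chains once from their start characters; a common superstring exists iff no constraint conflicts and the walk covers every distinct character.
import Mathlib
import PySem

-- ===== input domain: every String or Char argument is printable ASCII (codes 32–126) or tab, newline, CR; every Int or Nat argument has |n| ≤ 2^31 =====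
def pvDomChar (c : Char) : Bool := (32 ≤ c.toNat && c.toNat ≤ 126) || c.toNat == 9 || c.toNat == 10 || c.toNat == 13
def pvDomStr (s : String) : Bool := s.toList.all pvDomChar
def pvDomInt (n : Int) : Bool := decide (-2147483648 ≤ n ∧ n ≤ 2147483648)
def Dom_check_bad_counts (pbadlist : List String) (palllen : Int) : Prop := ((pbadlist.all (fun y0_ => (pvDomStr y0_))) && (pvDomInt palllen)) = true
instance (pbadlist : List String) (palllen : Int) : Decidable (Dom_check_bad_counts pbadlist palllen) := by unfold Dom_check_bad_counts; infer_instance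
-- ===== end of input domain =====

-- B replaces A's factorial-time scan of all permutations of the alphabet by a linear
-- successor/predecessor constraint graph built once, whose chains are walked from their
-- start characters; the two remaining branches are the same closed-form formulas as A's.

-- ===== PORT A =====

-- A's nmulti: product of range(1, num+1)
def nmulti (num : Int) : Int :=
  (PySem.List.pyRange 1 (num + 1) 1).foldl (fun sum i => sum * i) 1

-- A's alphabet/length loop: `for i in range(len(pbadlist)): for n in pbadlist[i]: ...`
def aScan (pbadlist : List String) : PySem.Set Char × Int :=
  (PySem.List.pyRange 0 (PySem.List.len pbadlist) 1).foldl
    (fun (st : PySem.Set Char × Int) i =>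
      let s := PySem.List.pyGetD pbadlist i ""
      (s.toList.foldl PySem.Set.add st.1, st.2 + PySem.Str.len s))
    (PySem.Set.empty, 0)

-- literal transliteration of A.  The `for perm in itertools.permutations(strrr)` loop with
-- `break` is `List.find?` over PySem.List.permutations; CPython's hash iteration order of
-- the set only affects WHICH witness permutation is found first, never the returned integer
-- (any found permutation has the set's size as its length), so the Set's insertion-ordered
-- element list stands in for it.
def check_bad_counts (pbadlist : List String) (palllen : Int) : Int :=
  if pbadlist.length = 1 then
    nmulti (palllen - PySem.Str.len (PySem.List.pyGetD pbadlist 0 "") + 1)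
  else
    if (aScan pbadlist).2 = PySem.Set.len (aScan pbadlist).1 then
      nmulti (palllen - (aScan pbadlist).2 + pbadlist.length)
    else
      if (((PySem.List.permutations (aScan pbadlist).1 (aScan pbadlist).1.length).find?
            (fun perm => pbadlist.all (fun sub => PySem.Chars.isIn sub.toList perm))).getD [])
          ≠ [] then
        nmulti (palllen -
          ((((PySem.List.permutations (aScan pbadlist).1 (aScan pbadlist).1.length).find?
            (fun perm => pbadlist.all (fun sub => PySem.Chars.isIn sub.toList perm))).getD []).length)
          + 1)
      else 0

-- ===== PORT B =====

-- B's _fact: product of range(2, n+1)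
def factB (n : Int) : Int :=
  (PySem.List.pyRange 2 (n + 1) 1).foldl (fun r i => r * i) 1

-- B's chars/total loop
def bScan (pbadlist : List String) : List Char × Int :=
  pbadlist.foldl
    (fun (st : List Char × Int) s =>
      (s.toList.foldl (fun cs c => if cs.contains c then cs else cs ++ [c]) st.1,
       st.2 + PySem.Str.len s))
    ([], 0)

-- the adjacent pairs zip(s, s[1:]) of every bad string, in loop order
def edgesOf (bads : List (List Char)) : List (Char × Char) :=
  bads.flatMap (fun s => s.zip s.tail)

-- one step of B's constraint loop; `none` is B's early `return 0`
def altStep (st : Option (PySem.Dict Char Char × PySem.Dict Char Char)) (e : Char × Char) :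
    Option (PySem.Dict Char Char × PySem.Dict Char Char) :=
  match st with
  | none => none
  | some (su, pr) =>
    if su.getD e.1 e.2 = e.2 ∧ pr.getD e.2 e.1 = e.1 then
      some (su.insert e.1 e.2, pr.insert e.2 e.1)
    else none


def altBuild (bads : List (List Char)) :
    Option (PySem.Dict Char Char × PySem.Dict Char Char) :=
  (edgesOf bads).foldl altStep (some (PySem.Dict.empty, PySem.Dict.empty))

-- B's inner `while x in succ` loop.  The fuel caps the number of iterations; when the
-- dictionaries were built successfully the walk from a chain head visits pairwise-distinct
-- characters of `chars` (proved below), so fuel = chars.length is never exhausted.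
def chainList (su : PySem.Dict Char Char) : Nat → Char → List Char
  | 0, x => [x]
  | f + 1, x =>
    match su.get? x with
    | none => [x]
    | some y => x :: chainList su f y


-- B's outer walk: one chain from every character with no predecessor
def altWalk (su pr : PySem.Dict Char Char) (chars : List Char) : List Char :=
  chars.foldl (fun out c => if pr.contains c then out else out ++ chainList su chars.length c) []


-- literal transliteration of B (Source B)
def check_bad_counts_alt (pbadlist : List String) (palllen : Int) : Int :=
  if pbadlist.length = 1 then
    factB (palllen - PySem.Str.len (PySem.List.pyGetD pbadlist 0 "") + 1)
  else
    if (bScan pbadlist).2 = ((bScan pbadlist).1.length : Int) then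
      factB (palllen - (bScan pbadlist).2 + pbadlist.length)
    else
      match altBuild (pbadlist.map String.toList) with
      | none => 0
      | some (su, pr) =>
        if (altWalk su pr (bScan pbadlist).1).length = (bScan pbadlist).1.length then
          factB (palllen - ((bScan pbadlist).1.length : Int) + 1)
        else 0

-- ===== PRECONDITION & SPEC =====
def Spec_check_bad_counts (pbadlist : List String) (palllen : Int) (out : Int) : Prop := out = check_bad_counts_alt pbadlist palllen
instance (pbadlist : List String) (palllen : Int) (out : Int) : Decidable (Spec_check_bad_counts pbadlist palllen out) := by unfold Spec_check_bad_counts; infer_instance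

-- ===== CLAIM (what is proved, stated in full; the proofs are below) =====
def Claim_equal_check_bad_counts : Prop := ∀ (pbadlist : List String) (palllen : Int), Dom_check_bad_counts pbadlist palllen → Spec_check_bad_counts pbadlist palllen (check_bad_counts pbadlist palllen)

-- ===== LEMMAS AND PROOFS =====

def iterSu (su : PySem.Dict Char Char) : Nat → Char → Option Char
  | 0, x => some x
  | k + 1, x =>
    match su.get? x with
    | none => none
    | some y => iterSu su k y


def Dual (su pr : PySem.Dict Char Char) : Prop :=
  ∀ a b, su.get? a = some b ↔ pr.get? b = some a


def FuncOn (su : PySem.Dict Char Char) (es : List (Char × Char)) : Prop :=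
  (∀ a b b', (su.get? a = some b ∨ (a, b) ∈ es) → (su.get? a = some b' ∨ (a, b') ∈ es) → b = b') ∧
  (∀ a a' b, (su.get? a = some b ∨ (a, b) ∈ es) → (su.get? a' = some b ∨ (a', b) ∈ es) → a = a')


theorem pair_infix_iff (p : List Char) (a b : Char) :
    [a, b] <:+: p ↔ ∃ i, ∃ h : i + 1 < p.length, p[i] = a ∧ p[i + 1] = b := by
  constructor
  · rintro ⟨l, r, rfl⟩
    have hlen : l.length + 1 < (l ++ [a, b] ++ r).length := by simp
    refine ⟨l.length, hlen, ?_, ?_⟩ <;> simp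
  · rintro ⟨i, h, ha, hb⟩
    refine ⟨p.take i, p.drop (i + 2), ?_⟩
    have h1 : p.drop i = a :: b :: p.drop (i + 2) := by
      rw [List.drop_eq_getElem_cons (by omega), ha]
      congr 1
      rw [List.drop_eq_getElem_cons (by omega), hb]
    calc p.take i ++ [a, b] ++ p.drop (i + 2) = p.take i ++ p.drop i := by rw [h1]; simp
      _ = p := List.take_append_drop i p

theorem zip_tail_mem_iff (s : List Char) (a b : Char) :
    (a, b) ∈ s.zip s.tail ↔ [a, b] <:+: s := by
  rw [pair_infix_iff, List.mem_iff_getElem]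
  constructor
  · rintro ⟨i, hi, heq⟩
    have hi' : i + 1 < s.length := by
      simp [List.length_zip, List.length_tail] at hi; omega
    refine ⟨i, hi', ?_⟩
    rw [List.getElem_zip] at heq
    have ht : s.tail[i]'(by simp [List.length_tail]; omega) = s[i + 1] := by
      simp [List.getElem_tail]
    rw [ht] at heq
    exact ⟨congrArg Prod.fst heq, congrArg Prod.snd heq⟩
  · rintro ⟨i, hi, ha, hb⟩
    refine ⟨i, by simp [List.length_zip, List.length_tail]; omega, ?_⟩
    rw [List.getElem_zip]
    have ht : s.tail[i]'(by simp [List.length_tail]; omega) = s[i + 1] := by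
      simp [List.getElem_tail]
    rw [ht, ha, hb]

theorem succ_unique {p : List Char} (hnd : p.Nodup) {a b c : Char}
    (h1 : [a, b] <:+: p) (h2 : [a, c] <:+: p) : b = c := by
  rw [pair_infix_iff] at h1 h2
  obtain ⟨i, hi, hia, hib⟩ := h1
  obtain ⟨j, hj, hja, hjb⟩ := h2
  have : i = j := (hnd.getElem_inj_iff (hi := by omega) (hj := by omega)).mp (hia.trans hja.symm)
  subst this
  exact hib.symm.trans hjb

theorem pred_unique {p : List Char} (hnd : p.Nodup) {a b c : Char}
    (h1 : [b, a] <:+: p) (h2 : [c, a] <:+: p) : b = c := by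
  rw [pair_infix_iff] at h1 h2
  obtain ⟨i, hi, hia, hib⟩ := h1
  obtain ⟨j, hj, hja, hjb⟩ := h2
  have : i + 1 = j + 1 := (hnd.getElem_inj_iff (hi := by omega) (hj := by omega)).mp (hib.trans hjb.symm)
  have : i = j := by omega
  subst this
  exact hia.symm.trans hja

theorem comp_infix {p : List Char} (hnd : p.Nodup) {a b : Char} {t : List Char}
    (h1 : [a, b] <:+: p) (h2 : b :: t <:+: p) : a :: b :: t <:+: p := by
  obtain ⟨l2, r2, rfl⟩ := h2
  rw [pair_infix_iff] at h1
  obtain ⟨i, hi, hia, hib⟩ := h1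
  have hb2 : (l2 ++ (b :: t) ++ r2)[l2.length]'(by simp) = b := by simp
  have hieq : i + 1 = l2.length := by
    apply (hnd.getElem_inj_iff (hi := by omega) (hj := by simp)).mp
    rw [hib, hb2]
  have hlen : i < l2.length := by omega
  have hl2i : l2[i]'(by omega) = a := by
    rw [← hia]
    simp [List.getElem_append, hlen]
  have hsplit : l2 = l2.take i ++ [a] := by
    have h1 : l2.length = i + 1 := hieq.symm
    conv_lhs => rw [← List.take_append_drop i l2]
    congr 1
    rw [List.drop_eq_getElem_cons (by omega), hl2i]
    have : l2.drop (i + 1) = [] := by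
      apply List.drop_eq_nil_of_le; omega
    rw [this]
  refine ⟨l2.take i, r2, ?_⟩
  conv_rhs => rw [hsplit]
  simp


theorem foldl_altStep_none (es : List (Char × Char)) : es.foldl altStep none = none := by
  induction es with
  | nil => rfl
  | cons e es ih => simpa [altStep] using ih

theorem build_aux (es : List (Char × Char)) :
    ∀ su pr, Dual su pr →
      ((es.foldl altStep (some (su, pr))).isSome ↔ FuncOn su es) ∧
      (∀ su' pr', es.foldl altStep (some (su, pr)) = some (su', pr') →
        Dual su' pr' ∧ ∀ a b, su'.get? a = some b ↔ (su.get? a = some b ∨ (a, b) ∈ es)) := by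
  induction es with
  | nil =>
    intro su pr d
    refine ⟨?_, ?_⟩
    · simp only [List.foldl_nil, Option.isSome_some, true_iff]
      refine ⟨?_, ?_⟩
      · intro a b b' h1 h2
        simp only [List.not_mem_nil, or_false] at h1 h2
        rw [h1] at h2
        exact Option.some_injective _ h2
      · intro a a' b h1 h2
        simp only [List.not_mem_nil, or_false] at h1 h2
        have p1 := (d a b).mp h1
        have p2 := (d a' b).mp h2
        rw [p1] at p2
        exact Option.some_injective _ p2
    · intro su' pr' h
      simp only [List.foldl_nil, Option.some.injEq, Prod.mk.injEq] at h
      obtain ⟨rfl, rfl⟩ := h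
      exact ⟨d, by simp⟩
  | cons e es ih =>
    rintro su pr d
    obtain ⟨a, b⟩ := e
    by_cases hcheck : su.getD a b = b ∧ pr.getD b a = a
    · have hstep : altStep (some (su, pr)) (a, b) = some (su.insert a b, pr.insert b a) := by
        simp [altStep, hcheck]
      have hsu : ∀ y, su.get? a = some y → y = b := by
        intro y hy
        have := hcheck.1
        rw [PySem.Dict.getD_eq_get?_getD, hy] at this
        simpa using this
      have hpr : ∀ x, pr.get? b = some x → x = a := by
        intro x hx
        have := hcheck.2
        rw [PySem.Dict.getD_eq_get?_getD, hx] at this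
        simpa using this
      have d1 : Dual (su.insert a b) (pr.insert b a) := by
        intro x y
        rw [PySem.Dict.get?_insert, PySem.Dict.get?_insert]
        by_cases hx : x = a <;> by_cases hy : y = b
        · rw [if_pos hx, if_pos hy, hx, hy]
          simp
        · rw [if_pos hx, if_neg hy]
          simp only [Option.some.injEq]
          constructor
          · intro h; exact absurd h.symm hy
          · intro h
            have h' : pr.get? y = some a := hx ▸ h
            exact absurd (hsu y ((d a y).mpr h')) hy
        · rw [if_neg hx, if_pos hy]
          constructor
          · intro h
            exact absurd (hpr x ((d x b).mp (hy ▸ h))) hx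
          · intro h
            exact absurd (Option.some_injective _ h).symm hx
        · rw [if_neg hx, if_neg hy]
          exact d x y
      have hcomb : ∀ x y, ((su.insert a b).get? x = some y ∨ (x, y) ∈ es) ↔
          (su.get? x = some y ∨ (x, y) ∈ (a, b) :: es) := by
        intro x y
        rw [PySem.Dict.get?_insert]
        by_cases hx : x = a
        · rw [if_pos hx]
          simp only [Option.some.injEq, List.mem_cons, Prod.mk.injEq]
          constructor
          · rintro (rfl | h)
            · exact Or.inr (Or.inl ⟨hx, rfl⟩)
            · exact Or.inr (Or.inr h)
          · rintro (h | h2)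
            · exact Or.inl (hsu y (hx ▸ h)).symm
            · rcases h2 with ⟨-, rfl⟩ | h
              · exact Or.inl rfl
              · exact Or.inr h
        · rw [if_neg hx]
          simp only [List.mem_cons, Prod.mk.injEq]
          constructor
          · rintro (h | h)
            · exact Or.inl h
            · exact Or.inr (Or.inr h)
          · rintro (h | h2)
            · exact Or.inl h
            · rcases h2 with ⟨h1, -⟩ | h
              · exact absurd h1 hx
              · exact Or.inr h
      have hfunc : FuncOn (su.insert a b) es ↔ FuncOn su ((a, b) :: es) := by
        constructor
        · rintro ⟨f1, f2⟩
          exact ⟨fun x y y' h1 h2 => f1 x y y' ((hcomb x y).mpr h1) ((hcomb x y').mpr h2),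
                 fun x x' y h1 h2 => f2 x x' y ((hcomb x y).mpr h1) ((hcomb x' y).mpr h2)⟩
        · rintro ⟨f1, f2⟩
          exact ⟨fun x y y' h1 h2 => f1 x y y' ((hcomb x y).mp h1) ((hcomb x y').mp h2),
                 fun x x' y h1 h2 => f2 x x' y ((hcomb x y).mp h1) ((hcomb x' y).mp h2)⟩
      obtain ⟨ih1, ih2⟩ := ih (su.insert a b) (pr.insert b a) d1
      constructor
      · rw [List.foldl_cons, hstep, ih1, hfunc]
      · intro su' pr' h
        rw [List.foldl_cons, hstep] at h
        obtain ⟨hd, hc⟩ := ih2 su' pr' h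
        refine ⟨hd, fun x y => ?_⟩
        rw [hc x y, hcomb x y]
    · have hstep : altStep (some (su, pr)) (a, b) = none := by
        simp only [altStep, if_neg hcheck]
      rw [List.foldl_cons, hstep, foldl_altStep_none]
      constructor
      · simp only [Option.isSome_none, Bool.false_eq_true, false_iff]
        rintro ⟨f1, f2⟩
        rw [Decidable.not_and_iff_or_not] at hcheck
        rcases hcheck with h | h
        · rcases hy : su.get? a with _ | y
          · rw [PySem.Dict.getD_eq_get?_getD, hy] at h; simp at h
          · have : y = b := f1 a y b (Or.inl hy) (Or.inr (List.mem_cons_self))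
            subst this
            rw [PySem.Dict.getD_eq_get?_getD, hy] at h; simp at h
        · rcases hx : pr.get? b with _ | x
          · rw [PySem.Dict.getD_eq_get?_getD, hx] at h; simp at h
          · have hsx : su.get? x = some b := (d x b).mpr hx
            have : x = a := f2 x a b (Or.inl hsx) (Or.inr (List.mem_cons_self))
            subst this
            rw [PySem.Dict.getD_eq_get?_getD, hx] at h; simp at h
      · intro su' pr' h; exact absurd h (by simp)


theorem iterSu_succ_right (su : PySem.Dict Char Char) (k : Nat) (x : Char) :
    iterSu su (k + 1) x = (iterSu su k x).bind su.get? := by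
  induction k generalizing x with
  | zero =>
    rcases h : su.get? x with _ | y <;> simp [iterSu, h]
  | succ k ih =>
    rcases h : su.get? x with _ | y
    · have l1 : iterSu su (k + 1 + 1) x = none := by simp [iterSu, h]
      have l2 : iterSu su (k + 1) x = none := by simp [iterSu, h]
      rw [l1, l2]
      rfl
    · have l1 : iterSu su (k + 1 + 1) x = iterSu su (k + 1) y := by simp [iterSu, h]
      have l2 : iterSu su (k + 1) x = iterSu su k y := by simp [iterSu, h]
      rw [l1, l2, ih y]

theorem chain_shape (su : PySem.Dict Char Char) (f : Nat) (x : Char) :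
    ∃ t, chainList su f x = x :: t := by
  cases f with
  | zero => exact ⟨[], rfl⟩
  | succ f => rcases h : su.get? x with _ | y <;> simp [chainList, h]

theorem chain_ne_nil (su : PySem.Dict Char Char) (f : Nat) (x : Char) :
    chainList su f x ≠ [] := by
  obtain ⟨t, ht⟩ := chain_shape su f x; simp [ht]

theorem chain_mem (su : PySem.Dict Char Char) (f : Nat) (x c : Char)
    (h : c ∈ chainList su f x) : c = x ∨ ∃ a, su.get? a = some c := by
  induction f generalizing x with
  | zero => simp [chainList] at h; exact Or.inl h
  | succ f ih =>
    rcases hx : su.get? x with _ | y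
    · simp [chainList, hx] at h; exact Or.inl h
    · simp only [chainList, hx, List.mem_cons] at h
      rcases h with rfl | h
      · exact Or.inl rfl
      · rcases ih y h with rfl | h
        · exact Or.inr ⟨x, hx⟩
        · exact Or.inr h

theorem chain_iter (su : PySem.Dict Char Char) (f : Nat) (x c : Char)
    (h : c ∈ chainList su f x) : ∃ k, iterSu su k x = some c := by
  induction f generalizing x with
  | zero =>
    simp [chainList] at h
    exact ⟨0, by simp [iterSu, h]⟩
  | succ f ih =>
    rcases hx : su.get? x with _ | y
    · simp [chainList, hx] at h
      exact ⟨0, by simp [iterSu, h]⟩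
    · simp only [chainList, hx, List.mem_cons] at h
      rcases h with rfl | h
      · exact ⟨0, by simp [iterSu]⟩
      · obtain ⟨k, hk⟩ := ih y h
        exact ⟨k + 1, by simpa [iterSu, hx] using hk⟩

theorem chain_path (su : PySem.Dict Char Char) (f : Nat) (x : Char) :
    ∀ i (h : i + 1 < (chainList su f x).length),
      su.get? (chainList su f x)[i] = some (chainList su f x)[i + 1] := by
  induction f generalizing x with
  | zero => intro i h; simp [chainList] at h
  | succ f ih =>
    intro i h
    rcases hx : su.get? x with _ | y
    · simp [chainList, hx] at h
    · simp only [chainList, hx] at h ⊢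
      match i with
      | 0 =>
        obtain ⟨t, ht⟩ := chain_shape su f y
        simp [ht, hx]
      | i + 1 =>
        simp only [List.getElem_cons_succ]
        exact ih y i (by simpa using h)

theorem chain_last (su : PySem.Dict Char Char) (f : Nat) (x z : Char)
    (h : (chainList su f x).length ≤ f)
    (hz : (chainList su f x).getLast? = some z) :
    su.get? z = none := by
  induction f generalizing x with
  | zero => simp [chainList] at h
  | succ f ih =>
    rcases hx : su.get? x with _ | y
    · simp [chainList, hx] at hz
      exact hz ▸ hx
    · simp only [chainList, hx] at h hz
      obtain ⟨t, ht⟩ := chain_shape su f y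
      rw [ht, List.getLast?_cons_cons, ← ht] at hz
      exact ih y (by simp at h; omega) hz


theorem chain_nodup_aux {su pr : PySem.Dict Char Char} (d : Dual su pr) :
    ∀ (f : Nat) (x : Char) (acc : List Char),
      (acc ++ [x]).Nodup →
      List.IsChain (fun u v => su.get? u = some v) (acc ++ [x]) →
      (∀ z, (acc ++ [x]).head? = some z → pr.get? z = none) →
      (acc ++ chainList su f x).Nodup := by
  intro f
  induction f with
  | zero => intro x acc hnd _ _; simpa [chainList] using hnd
  | succ f ih =>
    intro x acc hnd hpath h0
    rcases hx : su.get? x with _ | y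
    · simpa [chainList, hx] using hnd
    · have hch : chainList su (f + 1) x = x :: chainList su f y := by
        simp [chainList, hx]
      rw [hch, List.append_cons]
      have hpy : pr.get? y = some x := (d x y).mp hx
      have hy_not : y ∉ acc ++ [x] := by
        intro hy
        obtain ⟨l1, l2, hsplit⟩ := List.append_of_mem hy
        rcases l1.eq_nil_or_concat with rfl | ⟨l1', w, rfl⟩
        all_goals try rw [List.concat_eq_append] at hsplit
        · have hhead : (acc ++ [x]).head? = some y := by rw [hsplit]; rfl
          have := h0 y hhead
          rw [this] at hpy
          exact absurd hpy (by simp)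
        · rw [List.append_assoc, List.singleton_append] at hsplit
          have hchain2 := hpath
          rw [hsplit] at hchain2
          have hlink : su.get? w = some y := (List.isChain_append_cons_cons.mp hchain2).2.1
          have hw : w = x := by
            have := (d w y).mp hlink
            rw [hpy] at this
            exact (Option.some_injective _ this).symm
          have hnd2 := hnd
          rw [hsplit] at hnd2
          have hnd3 : (w :: y :: l2).Nodup := hnd2.of_append_right
          have hlast : (acc ++ [x]).getLast? = some w := by
            rw [List.getLast?_concat, hw]
          rw [hsplit] at hlast
          have h3 : (l1' ++ w :: y :: l2).getLast? = (y :: l2).getLast? := by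
            rw [List.getLast?_append_cons]
            have : w :: y :: l2 = [w] ++ y :: l2 := rfl
            rw [this, List.getLast?_append_cons]
          rw [h3] at hlast
          have : w ∈ y :: l2 := List.mem_of_getLast? hlast
          rw [List.nodup_cons] at hnd3
          exact hnd3.1 this
      apply ih y (acc ++ [x])
      · rw [List.nodup_append]
        refine ⟨hnd, by simp, ?_⟩
        intro z hz w hw
        simp only [List.mem_singleton] at hw
        subst hw
        intro heq
        exact hy_not (heq ▸ hz)
      · have : (acc ++ [x]) ++ [y] = acc ++ x :: y :: [] := by simp
        rw [this]
        exact List.isChain_append_cons_cons.mpr ⟨by simpa using hpath, hx, List.isChain_singleton y⟩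
      · intro z hz
        apply h0
        rcases acc with _ | ⟨a, acc⟩ <;> simpa using hz

theorem chain_nodup {su pr : PySem.Dict Char Char} (d : Dual su pr) (f : Nat) (x : Char)
    (hx : pr.get? x = none) : (chainList su f x).Nodup := by
  have := chain_nodup_aux d f x [] (by simp) (by simpa using List.isChain_singleton x)
    (by intro z hz; simp at hz; subst hz; exact hx)
  simpa using this

theorem src_unique {su pr : PySem.Dict Char Char} (d : Dual su pr) :
    ∀ k1 k2 c1 c2 z, pr.get? c1 = none → pr.get? c2 = none →
      iterSu su k1 c1 = some z → iterSu su k2 c2 = some z → c1 = c2 := by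
  intro k1
  induction k1 with
  | zero =>
    intro k2 c1 c2 z h1 h2 e1 e2
    have hz : c1 = z := by simpa [iterSu] using e1
    subst hz
    match k2 with
    | 0 => symm; simpa [iterSu] using e2
    | j + 1 =>
      rw [iterSu_succ_right] at e2
      obtain ⟨w, hw, hsw⟩ := Option.bind_eq_some_iff.mp e2
      have : pr.get? c1 = some w := (d w c1).mp hsw
      rw [h1] at this
      exact absurd this (by simp)
  | succ i ih =>
    intro k2 c1 c2 z h1 h2 e1 e2
    rw [iterSu_succ_right] at e1
    obtain ⟨w1, hw1, hsw1⟩ := Option.bind_eq_some_iff.mp e1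
    match k2 with
    | 0 =>
      have hz : c2 = z := by simpa [iterSu] using e2
      subst hz
      have : pr.get? c2 = some w1 := (d w1 c2).mp hsw1
      rw [h2] at this
      exact absurd this (by simp)
    | j + 1 =>
      rw [iterSu_succ_right] at e2
      obtain ⟨w2, hw2, hsw2⟩ := Option.bind_eq_some_iff.mp e2
      have hp1 : pr.get? z = some w1 := (d w1 z).mp hsw1
      have hp2 : pr.get? z = some w2 := (d w2 z).mp hsw2
      rw [hp1] at hp2
      have : w1 = w2 := Option.some_injective _ hp2
      subst this
      exact ih j c1 c2 w1 h1 h2 hw1 hw2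

theorem foldl_if_append (p : Char → Bool) (g : Char → List Char) :
    ∀ (l : List Char) (acc : List Char),
      l.foldl (fun out c => if p c then out else out ++ g c) acc
        = acc ++ (l.filter (fun c => !p c)).flatMap g := by
  intro l
  induction l with
  | nil => intro acc; simp
  | cons c l ih =>
    intro acc
    by_cases hc : p c <;> simp [List.foldl_cons, hc, ih, List.filter_cons]

theorem flatMap_infix {g : Char → List Char} {l : List Char} {c : Char} (h : c ∈ l) :
    g c <:+: l.flatMap g := by
  obtain ⟨s, t, rfl⟩ := List.append_of_mem h
  exact ⟨s.flatMap g, t.flatMap g, by simp⟩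

theorem walk_eq (su pr : PySem.Dict Char Char) (chars : List Char) :
    altWalk su pr chars
      = (chars.filter (fun c => !pr.contains c)).flatMap (chainList su chars.length) := by
  unfold altWalk
  rw [foldl_if_append (fun c => pr.contains c) (chainList su chars.length) chars []]
  simp

theorem not_contains_iff_none (pr : PySem.Dict Char Char) (c : Char) :
    pr.contains c = false ↔ pr.get? c = none := by
  rw [PySem.Dict.contains_eq_isSome_get?]
  rcases pr.get? c with _ | v <;> simp

theorem chain_subset {su : PySem.Dict Char Char} {chars : List Char}
    (hdom : ∀ a b, su.get? a = some b → a ∈ chars ∧ b ∈ chars) (f : Nat) {c : Char}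
    (hc : c ∈ chars) : ∀ z ∈ chainList su f c, z ∈ chars := by
  intro z hz
  rcases chain_mem su f c z hz with rfl | ⟨a, ha⟩
  · exact hc
  · exact (hdom a z ha).2

theorem walk_nodup {su pr : PySem.Dict Char Char} (d : Dual su pr) (chars : List Char)
    (hnd : chars.Nodup) : (altWalk su pr chars).Nodup := by
  rw [walk_eq]
  rw [List.nodup_flatMap]
  constructor
  · intro c hc
    have := (List.mem_filter.mp hc).2
    simp only [Bool.not_eq_true'] at this
    exact chain_nodup d chars.length c ((not_contains_iff_none pr c).mp this)
  · have hfnd : (chars.filter (fun c => !pr.contains c)).Nodup := hnd.filter _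
    apply hfnd.imp_of_mem
    intro c1 c2 h1 h2 hne z hz1 hz2
    have hs1 := (not_contains_iff_none pr c1).mp (by simpa using (List.mem_filter.mp h1).2)
    have hs2 := (not_contains_iff_none pr c2).mp (by simpa using (List.mem_filter.mp h2).2)
    obtain ⟨k1, hk1⟩ := chain_iter su chars.length c1 z hz1
    obtain ⟨k2, hk2⟩ := chain_iter su chars.length c2 z hz2
    exact hne (src_unique d k1 k2 c1 c2 z hs1 hs2 hk1 hk2)

theorem walk_subset {su pr : PySem.Dict Char Char} {chars : List Char}
    (hdom : ∀ a b, su.get? a = some b → a ∈ chars ∧ b ∈ chars) :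
    ∀ z ∈ altWalk su pr chars, z ∈ chars := by
  intro z hz
  rw [walk_eq] at hz
  obtain ⟨c, hc, hzc⟩ := List.mem_flatMap.mp hz
  exact chain_subset hdom chars.length (List.mem_filter.mp hc).1 z hzc

theorem walk_mem_source {su pr : PySem.Dict Char Char} {chars : List Char} {c : Char}
    (hc : c ∈ chars) (hsrc : pr.get? c = none) : c ∈ altWalk su pr chars := by
  rw [walk_eq]
  apply List.mem_flatMap.mpr
  refine ⟨c, ?_, ?_⟩
  · apply List.mem_filter.mpr
    refine ⟨hc, by simp [(not_contains_iff_none pr c).mpr hsrc]⟩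
  · obtain ⟨t, ht⟩ := chain_shape su chars.length c
    rw [ht]; exact List.mem_cons_self

theorem walk_adj {su pr : PySem.Dict Char Char} (d : Dual su pr) {chars : List Char}
    (hnd : chars.Nodup) (hdom : ∀ a b, su.get? a = some b → a ∈ chars ∧ b ∈ chars)
    {z v : Char} (hz : z ∈ altWalk su pr chars) (hv : su.get? z = some v) :
    [z, v] <:+: altWalk su pr chars ∧ v ∈ altWalk su pr chars := by
  have hz' := hz
  rw [walk_eq] at hz'
  obtain ⟨c, hc, hzc⟩ := List.mem_flatMap.mp hz'
  have hcchars := (List.mem_filter.mp hc).1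
  have hcsrc := (not_contains_iff_none pr c).mp (by simpa using (List.mem_filter.mp hc).2)
  have hchain_nodup : (chainList su chars.length c).Nodup := chain_nodup d chars.length c hcsrc
  have hchain_sub : ∀ w ∈ chainList su chars.length c, w ∈ chars :=
    chain_subset hdom chars.length hcchars
  have hchain_len : (chainList su chars.length c).length ≤ chars.length :=
    (hchain_nodup.subperm (fun w hw => hchain_sub w hw)).length_le
  obtain ⟨i, hi, hiz⟩ := List.getElem_of_mem hzc
  have hchain_inf : chainList su chars.length c <:+: altWalk su pr chars := by
    rw [walk_eq]
    exact flatMap_infix hc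
  by_cases hlt : i + 1 < (chainList su chars.length c).length
  · have hpath := chain_path su chars.length c i hlt
    rw [hiz] at hpath
    rw [hv] at hpath
    have hnext : (chainList su chars.length c)[i + 1] = v :=
      (Option.some_injective _ hpath.symm)
    have hpair : [z, v] <:+: chainList su chars.length c := by
      rw [pair_infix_iff]
      exact ⟨i, hlt, hiz, hnext⟩
    refine ⟨hpair.trans hchain_inf, ?_⟩
    have : v ∈ chainList su chars.length c := by
      rw [← hnext]; exact List.getElem_mem _
    exact hchain_inf.subset this
  · exfalso
    have hpos : 0 < (chainList su chars.length c).length :=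
      List.length_pos_of_ne_nil (chain_ne_nil su chars.length c)
    have hieq : i = (chainList su chars.length c).length - 1 := by omega
    have hiz? : (chainList su chars.length c)[i]? = some z := by
      rw [List.getElem?_eq_getElem hi, hiz]
    rw [hieq] at hiz?
    have hlastz : (chainList su chars.length c).getLast? = some z := by
      rw [List.getLast?_eq_getElem?]
      exact hiz?
    have := chain_last su chars.length c z hchain_len hlastz
    rw [this] at hv
    exact absurd hv (by simp)

theorem mem_permutations_of_perm :
    ∀ (p L : List Char), p.Perm L → p ∈ PySem.List.permutations L L.length := by
  intro p
  induction p with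
  | nil =>
    intro L h
    have : L = [] := h.symm.eq_nil
    subst this
    simp [PySem.List.permutations]
  | cons a q ih =>
    intro L h
    have ha : a ∈ L := h.subset List.mem_cons_self
    have hlen : L.length = q.length + 1 := by
      rw [← h.length_eq]; simp
    have hi : L.idxOf a < L.length := List.idxOf_lt_length_of_mem ha
    have hgi : L[L.idxOf a] = a := List.getElem_idxOf hi
    have hq : q.Perm (L.eraseIdx (L.idxOf a)) := by
      have hLsplit : L = L.take (L.idxOf a) ++ a :: L.drop (L.idxOf a + 1) := by
        conv_lhs => rw [← List.take_append_drop (L.idxOf a) L]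
        rw [List.drop_eq_getElem_cons hi, hgi]
      have hperm : (a :: q).Perm (a :: (L.take (L.idxOf a) ++ L.drop (L.idxOf a + 1))) := by
        refine h.trans ?_
        have hmid := List.perm_middle (a := a) (l₁ := L.take (L.idxOf a)) (l₂ := L.drop (L.idxOf a + 1))
        rw [← hLsplit] at hmid
        exact hmid
      have := hperm.cons_inv
      rwa [List.eraseIdx_eq_take_drop_succ]
    have hlen2 : (L.eraseIdx (L.idxOf a)).length = q.length := by
      rw [List.length_eraseIdx_of_lt hi]
      omega
    have hmem := ih (L.eraseIdx (L.idxOf a)) hq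
    rw [hlen2] at hmem
    rw [hlen]
    have hunf : PySem.List.permutations L (q.length + 1)
        = (List.range L.length).flatMap (fun j =>
            match L[j]? with
            | none => []
            | some x => (PySem.List.permutations (L.eraseIdx j) q.length).map (x :: ·)) := by
      show PySem.List.permutations L (q.length + 1) = _
      conv_lhs => rw [PySem.List.permutations]
      congr 1
      funext j
      rcases L[j]? with _ | x <;> rfl
    rw [hunf]
    apply List.mem_flatMap.mpr
    refine ⟨L.idxOf a, by simpa using hi, ?_⟩
    rw [List.getElem?_eq_getElem hi, hgi]
    show a :: q ∈ (PySem.List.permutations (L.eraseIdx (L.idxOf a)) q.length).map (a :: ·)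
    exact List.mem_map.mpr ⟨q, hmem, rfl⟩


theorem mem_edges_iff (bads : List (List Char)) (a b : Char) :
    (a, b) ∈ edgesOf bads ↔ ∃ s ∈ bads, [a, b] <:+: s := by
  unfold edgesOf
  rw [List.mem_flatMap]
  constructor
  · rintro ⟨s, hs, hab⟩
    exact ⟨s, hs, (zip_tail_mem_iff s a b).mp hab⟩
  · rintro ⟨s, hs, hab⟩
    exact ⟨s, hs, (zip_tail_mem_iff s a b).mpr hab⟩

theorem dual_empty : Dual (PySem.Dict.empty : PySem.Dict Char Char) PySem.Dict.empty := by
  intro a b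
  simp [PySem.Dict.get?_empty]

theorem singleton_infix {a : Char} {p : List Char} (h : a ∈ p) : [a] <:+: p := by
  obtain ⟨s, t, rfl⟩ := List.append_of_mem h
  exact ⟨s, t, by simp⟩

-- a run of successor links whose head lies in the walk is an infix of the walk
theorem run_infix {su pr : PySem.Dict Char Char} (d : Dual su pr) {chars : List Char}
    (hnd : chars.Nodup) (hdom : ∀ a b, su.get? a = some b → a ∈ chars ∧ b ∈ chars) :
    ∀ (s : List Char), (∀ a b, [a, b] <:+: s → su.get? a = some b) →
      (∀ x, s.head? = some x → x ∈ altWalk su pr chars) →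
      s <:+: altWalk su pr chars := by
  intro s
  induction s with
  | nil => intro _ _; exact List.nil_infix
  | cons x t ih =>
    intro hlinks hhead
    have hx : x ∈ altWalk su pr chars := hhead x rfl
    cases t with
    | nil => exact singleton_infix hx
    | cons y t' =>
      have hxy : su.get? x = some y := hlinks x y ⟨[], t', rfl⟩
      obtain ⟨hpair, hy⟩ := walk_adj d hnd hdom hx hxy
      have htail : y :: t' <:+: altWalk su pr chars := by
        apply ih ?_ ?_
        · intro a b hab
          exact hlinks a b (hab.trans ⟨[x], [], by simp⟩)
        · intro z hz
          simp only [List.head?_cons, Option.some.injEq] at hz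
          subst hz
          exact hy
      exact comp_infix (walk_nodup d chars hnd) hpair htail

-- B accepts ⇒ some permutation satisfies A's test
theorem dir_b_to_a (bads : List (List Char)) (chars : List Char)
    (hnd : chars.Nodup)
    (hmemc : ∀ s ∈ bads, ∀ c ∈ s, c ∈ chars)
    {su pr : PySem.Dict Char Char}
    (hb : altBuild bads = some (su, pr))
    (hw : (altWalk su pr chars).length = chars.length) :
    ∃ p ∈ PySem.List.permutations chars chars.length,
      bads.all (fun s => PySem.Chars.isIn s p) = true := by
  obtain ⟨d, hchar⟩ := (build_aux (edgesOf bads) PySem.Dict.empty PySem.Dict.empty dual_empty).2 su pr hb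
  have hchar' : ∀ a b, su.get? a = some b ↔ (a, b) ∈ edgesOf bads := by
    intro a b
    rw [hchar a b, PySem.Dict.get?_empty]
    simp
  have hdom : ∀ a b, su.get? a = some b → a ∈ chars ∧ b ∈ chars := by
    intro a b hab
    obtain ⟨s, hs, hinf⟩ := (mem_edges_iff bads a b).mp ((hchar' a b).mp hab)
    have hsub := hinf.subset
    exact ⟨hmemc s hs a (hsub (by simp)), hmemc s hs b (hsub (by simp))⟩
  have hWnd := walk_nodup d chars hnd
  have hWsub := walk_subset (pr := pr) hdom
  have hWperm : (altWalk su pr chars).Perm chars :=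
    (hWnd.subperm hWsub).perm_of_length_le (by omega)
  refine ⟨altWalk su pr chars, mem_permutations_of_perm _ _ hWperm, ?_⟩
  rw [List.all_eq_true]
  intro s hs
  rw [PySem.Chars.isIn_iff_infix]
  cases s with
  | nil => exact List.nil_infix
  | cons x t =>
    apply run_infix d hnd hdom (x :: t)
    · intro a b hab
      exact (hchar' a b).mpr ((mem_edges_iff bads a b).mpr ⟨x :: t, hs, hab⟩)
    · intro z hz
      simp only [List.head?_cons, Option.some.injEq] at hz
      exact hz ▸ (hWperm.mem_iff.mpr (hmemc (x :: t) hs x (by simp)))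

-- A found a permutation ⇒ B's build succeeds and the walk covers every character
theorem dir_a_to_b (bads : List (List Char)) (chars : List Char)
    (hnd : chars.Nodup)
    (hmemc : ∀ s ∈ bads, ∀ c ∈ s, c ∈ chars)
    {p : List Char}
    (hfind : (PySem.List.permutations chars chars.length).find?
      (fun perm => bads.all (fun s => PySem.Chars.isIn s perm)) = some p) :
    ∃ su pr, altBuild bads = some (su, pr) ∧ (altWalk su pr chars).length = chars.length := by
  have hp_mem := List.mem_of_find?_eq_some hfind
  have hp_pred := List.find?_some hfind
  have hperm : p.Perm chars := PySem.List.perm_of_mem_permutations hp_mem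
  have hpnd : p.Nodup := hperm.symm.nodup hnd
  have hinf : ∀ s ∈ bads, s <:+: p := by
    intro s hs
    rw [List.all_eq_true] at hp_pred
    exact (PySem.Chars.isIn_iff_infix s p).mp (hp_pred s hs)
  have hedge : ∀ a b, (a, b) ∈ edgesOf bads → [a, b] <:+: p := by
    intro a b hab
    obtain ⟨s, hs, hinfs⟩ := (mem_edges_iff bads a b).mp hab
    exact hinfs.trans (hinf s hs)
  have hfunc : FuncOn PySem.Dict.empty (edgesOf bads) := by
    constructor
    · intro a b b' h1 h2
      rw [PySem.Dict.get?_empty] at h1 h2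
      simp only [false_or, reduceCtorEq] at h1 h2
      exact succ_unique hpnd (hedge a b h1) (hedge a b' h2)
    · intro a a' b h1 h2
      rw [PySem.Dict.get?_empty] at h1 h2
      simp only [false_or, reduceCtorEq] at h1 h2
      exact pred_unique hpnd (hedge a b h1) (hedge a' b h2)
  have hsome : (altBuild bads).isSome :=
    ((build_aux (edgesOf bads) PySem.Dict.empty PySem.Dict.empty dual_empty).1).mpr hfunc
  obtain ⟨⟨su, pr⟩, hb⟩ := Option.isSome_iff_exists.mp hsome
  obtain ⟨d, hchar⟩ := (build_aux (edgesOf bads) PySem.Dict.empty PySem.Dict.empty dual_empty).2 su pr hb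
  have hchar' : ∀ a b, su.get? a = some b ↔ (a, b) ∈ edgesOf bads := by
    intro a b
    rw [hchar a b, PySem.Dict.get?_empty]
    simp
  have hdom : ∀ a b, su.get? a = some b → a ∈ chars ∧ b ∈ chars := by
    intro a b hab
    obtain ⟨s, hs, hinfs⟩ := (mem_edges_iff bads a b).mp ((hchar' a b).mp hab)
    have hsub := hinfs.subset
    exact ⟨hmemc s hs a (hsub (by simp)), hmemc s hs b (hsub (by simp))⟩
  refine ⟨su, pr, hb, ?_⟩
  have claim : ∀ i, ∀ hi : i < p.length, p[i] ∈ altWalk su pr chars := by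
    intro i
    induction i using Nat.strong_induction_on with
    | _ i IH =>
      intro hi
      rcases hpc : pr.get? p[i] with _ | a
      · exact walk_mem_source (hperm.subset (List.getElem_mem hi)) hpc
      · have hsc : su.get? a = some p[i] := (d a p[i]).mpr hpc
        have hacp : [a, p[i]] <:+: p := hedge a p[i] ((hchar' a p[i]).mp hsc)
        rw [pair_infix_iff] at hacp
        obtain ⟨j, hj, hja, hjc⟩ := hacp
        have hji : j + 1 = i := by
          apply (hpnd.getElem_inj_iff (hi := hj) (hj := hi)).mp
          rw [hjc]
        have haW : p[j] ∈ altWalk su pr chars := IH j (by omega) (by omega)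
        rw [hja] at haW
        exact (walk_adj d hnd hdom haW hsc).2
  have hsubW : ∀ c ∈ chars, c ∈ altWalk su pr chars := by
    intro c hc
    obtain ⟨i, hi, rfl⟩ := List.getElem_of_mem (hperm.mem_iff.mpr hc)
    exact claim i hi
  have h1 : (altWalk su pr chars).length ≤ chars.length :=
    ((walk_nodup d chars hnd).subperm (walk_subset (pr := pr) hdom)).length_le
  have h2 : chars.length ≤ (altWalk su pr chars).length :=
    (hnd.subperm hsubW).length_le
  omega


-- A's product over range(1, n+1) and B's over range(2, n+1) agree (the extra factor is 1)
theorem nmulti_eq_factB (n : Int) : nmulti n = factB n := by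
  unfold nmulti factB
  by_cases h : n ≤ 0
  · rw [PySem.List.pyRange_one_eq_nil (by omega), PySem.List.pyRange_one_eq_nil (by omega)]
  · rw [PySem.List.pyRange_one_cons (by omega)]
    norm_num

-- A's index loop over range(len(pbadlist)) computes exactly B's fold over the list
theorem aScan_eq_bScan (pbadlist : List String) : aScan pbadlist = bScan pbadlist := by
  unfold aScan bScan
  exact PySem.List.foldl_pyRange_zero_pyGetD pbadlist ""
    (fun (st : PySem.Set Char × Int) s =>
      (s.toList.foldl PySem.Set.add st.1, st.2 + PySem.Str.len s))
    (PySem.Set.empty, 0)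

-- B's scan returns the ordered set of characters and the total length
theorem bScan_spec (pbadlist : List String) :
    bScan pbadlist = (PySem.Set.ofList (pbadlist.flatMap (fun s => s.toList)),
                      ((pbadlist.flatMap (fun s => s.toList)).length : Int)) := by
  have gen : ∀ (l : List String) (cs0 : List Char) (t0 : Int),
      l.foldl (fun (st : List Char × Int) s =>
        (s.toList.foldl (fun cs c => if cs.contains c then cs else cs ++ [c]) st.1,
         st.2 + PySem.Str.len s)) (cs0, t0)
      = ((l.flatMap (fun s => s.toList)).foldl PySem.Set.add cs0,
         t0 + ((l.flatMap (fun s => s.toList)).length : Int)) := by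
    intro l
    induction l with
    | nil => intro cs0 t0; simp
    | cons s l ih =>
      intro cs0 t0
      rw [List.foldl_cons, ih, List.flatMap_cons, List.foldl_append]
      refine Prod.ext rfl ?_
      show t0 + PySem.Str.len s + _ = _
      rw [PySem.Str.len_eq]
      push_cast [List.length_append]
      ring
  unfold bScan
  rw [gen pbadlist [] 0, PySem.Set.ofList_eq_foldl]
  norm_num

-- ===== VERDICT (by name: the statement is the Claim_ definition above) =====
theorem check_bad_counts_spec : Claim_equal_check_bad_counts := by
  intro pbadlist palllen _
  unfold Spec_check_bad_counts
  show check_bad_counts pbadlist palllen = check_bad_counts_alt pbadlist palllen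
  unfold check_bad_counts check_bad_counts_alt
  by_cases h1 : pbadlist.length = 1
  · rw [if_pos h1, if_pos h1, nmulti_eq_factB]
  · rw [if_neg h1, if_neg h1, aScan_eq_bScan, bScan_spec]
    dsimp only
    set allChars := pbadlist.flatMap (fun s => s.toList) with hall
    set chars := PySem.Set.ofList allChars with hchars
    have hlen_set : PySem.Set.len chars = (chars.length : Int) := rfl
    rw [hlen_set]
    by_cases h2 : (allChars.length : Int) = (chars.length : Int)
    · rw [if_pos h2, if_pos h2, nmulti_eq_factB]
    · rw [if_neg h2, if_neg h2]
      have hnd : chars.Nodup := PySem.Set.nodup_ofList allChars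
      have hmemc : ∀ s ∈ pbadlist.map String.toList, ∀ c ∈ s, c ∈ chars := by
        intro s hs c hc
        obtain ⟨s0, hs0, rfl⟩ := List.mem_map.mp hs
        exact (PySem.Set.mem_ofList allChars c).mpr (List.mem_flatMap.mpr ⟨s0, hs0, hc⟩)
      have hne : chars ≠ [] := by
        intro hemp
        apply h2
        have hflat : allChars = [] := by
          rw [List.eq_nil_iff_forall_not_mem]
          intro c hc
          have : c ∈ chars := (PySem.Set.mem_ofList allChars c).mpr hc
          rw [hemp] at this
          exact absurd this (by simp)
        rw [hflat, hemp]
      have hpred : (fun perm => pbadlist.all (fun sub => PySem.Chars.isIn sub.toList perm))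
          = (fun perm => (pbadlist.map String.toList).all (fun s => PySem.Chars.isIn s perm)) := by
        funext perm
        rw [List.all_map]
        rfl
      rw [hpred]
      rcases hfind : (PySem.List.permutations chars chars.length).find?
          (fun perm => (pbadlist.map String.toList).all (fun s => PySem.Chars.isIn s perm))
          with _ | p
      · rw [if_neg (by simp)]
        rcases hAB : altBuild (pbadlist.map String.toList) with _ | ⟨su, pr⟩
        · rfl
        · show 0 = if (altWalk su pr chars).length = chars.length then _ else 0
          rw [if_neg ?_]
          intro hwlen
          obtain ⟨p, hpmem, hppred⟩ :=
            dir_b_to_a (pbadlist.map String.toList) chars hnd hmemc hAB hwlen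
          exact absurd hppred (by simpa using List.find?_eq_none.mp hfind p hpmem)
      · obtain ⟨su, pr, hb, hwlen⟩ :=
          dir_a_to_b (pbadlist.map String.toList) chars hnd hmemc hfind
        rw [hb]
        show _ = if (altWalk su pr chars).length = chars.length then _ else 0
        rw [if_pos hwlen]
        have hplen : p.length = chars.length :=
          PySem.List.length_of_mem_permutations (List.mem_of_find?_eq_some hfind)
        have hppos : p ≠ [] := by
          intro hpe
          apply hne
          rw [hpe] at hplen
          exact List.eq_nil_of_length_eq_zero hplen.symm
        rw [Option.getD_some, if_pos hppos, nmulti_eq_factB, hplen]
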